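-- pv_equiv track=rewrite | github.com/elaineyoung702/code_challenges | anagramofpalindrome.py | is_anagram_of_palindrome
-- ===== SOURCE A (Python) =====
-- def is_anagram_of_palindrome(word):
--     """Is the word an anagram of a palindrome?"""
--
--     #if length of word is odd number (mod% == 1)
--     #dict shoudl have values of 2 for all keys except 1
--
--     #if length of word is even mod%==0
--     #dict should have values of 2 for all keys return True
--
--     letter_dict = {}
--
--     if not word:
--         return False
--
--     if len(word) % 2 == 1:
--         for letter in word:
--             if letter not in letter_dict:
--                 letter_dict[letter] = 1
--             else:
--                 del letter_dict[letter]
--         if len(letter_dict) > 1: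
--             return False
--         else:
--             return True
--
--     else:
--         for letter in word:
--             if letter not in letter_dict:
--                 letter_dict[letter] = 1
--             else:
--                 del letter_dict[letter]
--         if len(letter_dict) == 0:
--             return True
--         else:
--             return False
-- ===== SOURCE B (Python) =====
-- def is_anagram_of_palindrome(word):
--     """Is the word an anagram of a palindrome?"""
--     if not word:
--         return False
--     counts = {}
--     for letter in word:
--         counts[letter] = counts.get(letter, 0) + 1
--     odd = 0
--     for v in counts.values():
--         if v % 2 == 1:
--             odd += 1
--     return odd <= 1
-- ===== Notes on version B (the rewrite author's own statement) =====
-- stated objective: simpler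
-- what changed: Replaces A's length-parity branching over an incremental toggle-dict (insert/delete) with one frequency count followed by a single pass counting odd frequencies, returning odd <= 1 with no parity branch.
import Mathlib
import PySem

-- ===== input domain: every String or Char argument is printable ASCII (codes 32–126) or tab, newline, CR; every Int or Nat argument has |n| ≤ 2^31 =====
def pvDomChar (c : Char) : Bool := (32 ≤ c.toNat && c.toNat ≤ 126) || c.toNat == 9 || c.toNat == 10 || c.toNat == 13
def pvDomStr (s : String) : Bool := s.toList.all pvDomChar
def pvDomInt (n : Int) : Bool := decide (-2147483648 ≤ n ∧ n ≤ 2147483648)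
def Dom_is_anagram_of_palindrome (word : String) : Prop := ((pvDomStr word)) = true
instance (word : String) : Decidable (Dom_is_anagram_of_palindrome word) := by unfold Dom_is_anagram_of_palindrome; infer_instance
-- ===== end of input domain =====

-- B replaces A's length-parity branching over an incremental toggle-dict with a
-- frequency count plus a single pass counting odd frequencies (objective: simpler).


-- ===== PORT A =====
-- loop body of A: toggle `letter` in the dict (insert if absent, delete if present)
def pvTog (d : PySem.Dict Char Int) (letter : Char) : PySem.Dict Char Int :=
  if d.contains letter = false then d.insert letter 1 else d.erase letter

def is_anagram_of_palindrome (word : String) : Bool :=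
  if word.toList.isEmpty then false
  else if PySem.Int.mod (PySem.Str.len word) 2 == 1 then
    let d := word.toList.foldl pvTog (PySem.Dict.empty : PySem.Dict Char Int)
    if d.size > 1 then false else true
  else
    let d := word.toList.foldl pvTog (PySem.Dict.empty : PySem.Dict Char Int)
    if d.size == 0 then true else false

-- ===== PORT B =====
def is_anagram_of_palindrome_alt (word : String) : Bool :=
  if word.toList.isEmpty then false
  else
    let counts := word.toList.foldl
      (fun d letter => d.insert letter (d.getD letter 0 + 1))
      (PySem.Dict.empty : PySem.Dict Char Int)
    let odd := counts.values.foldl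
      (fun acc v => if PySem.Int.mod v 2 == 1 then acc + 1 else acc) (0 : Int)
    decide (odd ≤ 1)

-- ===== PRECONDITION & SPEC =====
def Spec_is_anagram_of_palindrome (word : String) (out : Bool) : Prop := out = is_anagram_of_palindrome_alt word
instance (word : String) (out : Bool) : Decidable (Spec_is_anagram_of_palindrome word out) := by unfold Spec_is_anagram_of_palindrome; infer_instance

-- ===== CLAIM (what is proved, stated in full; the proofs are below) =====
def Claim_equal_is_anagram_of_palindrome : Prop := ∀ (word : String), Dom_is_anagram_of_palindrome word → Spec_is_anagram_of_palindrome word (is_anagram_of_palindrome word)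

-- ===== LEMMAS AND PROOFS =====

theorem pv_keys_erase (d : PySem.Dict Char Int) (a : Char) :
    (d.erase a).keys = d.keys.filter (fun k => k != a) := by
  show (d.items.filter (fun p => !(p.1 == a))).map (·.1)
       = (d.items.map (·.1)).filter (fun k => k != a)
  induction d.items with
  | nil => rfl
  | cons p t ih =>
      by_cases h : p.1 = a <;> simp [h, ih]

theorem pvTog_nodup (d : PySem.Dict Char Int) (a : Char) (h : d.keys.Nodup) :
    (pvTog d a).keys.Nodup := by
  unfold pvTog
  split
  · exact PySem.Dict.nodup_keys_insert d a 1 h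
  · rw [pv_keys_erase]; exact h.filter _

theorem pvTog_mem (d : PySem.Dict Char Int) (a : Char) (h : d.keys.Nodup) (c : Char) :
    c ∈ (pvTog d a).keys ↔ Xor' (c ∈ d.keys) (c = a) := by
  unfold pvTog
  split
  · rename_i hc
    rw [PySem.Dict.keys_insert_of_not_contains d 1 hc]
    have hna : a ∉ d.keys := by
      intro hm
      rw [← PySem.Dict.contains_iff_mem_keys] at hm
      simp [hc] at hm
    by_cases hca : c = a <;> simp [Xor', hca, hna]
  · rename_i hc
    have ha : a ∈ d.keys := by
      rw [← PySem.Dict.contains_iff_mem_keys]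
      simpa using hc
    rw [pv_keys_erase]
    by_cases hca : c = a <;> simp [Xor', hca, ha]

theorem pvTog_size (d : PySem.Dict Char Int) (a : Char) (h : d.keys.Nodup) :
    (pvTog d a).size % 2 = (d.size + 1) % 2 := by
  have hsz : d.size = d.keys.length := by
    show d.items.length = (d.items.map (·.1)).length
    simp
  unfold pvTog
  split
  · rename_i hc
    rw [PySem.Dict.size_insert]
    simp [hc]
  · rename_i hc
    have ha : a ∈ d.keys := by
      rw [← PySem.Dict.contains_iff_mem_keys]
      simpa using hc
    have hsz' : (d.erase a).size = (d.keys.filter (fun k => k != a)).length := by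
      show (d.erase a).items.length = _
      have := congrArg List.length (pv_keys_erase d a)
      simpa [PySem.Dict.keys] using this
    rw [hsz', ← h.erase_eq_filter a, List.length_erase_of_mem ha, hsz]
    have : 0 < d.keys.length := List.length_pos_of_mem ha
    omega

theorem pvTog_fold_inv (l : List Char) :
    ∀ d : PySem.Dict Char Int, d.keys.Nodup →
      (l.foldl pvTog d).keys.Nodup ∧
      (∀ c, c ∈ (l.foldl pvTog d).keys ↔ Xor' (c ∈ d.keys) (l.count c % 2 = 1)) ∧
      (l.foldl pvTog d).size % 2 = (d.size + l.length) % 2 := by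
  induction l with
  | nil =>
      intro d h
      refine ⟨h, fun c => ?_, rfl⟩
      simp [Xor']
  | cons a t ih =>
      intro d h
      have h' := pvTog_nodup d a h
      obtain ⟨h1, h2, h3⟩ := ih (pvTog d a) h'
      refine ⟨h1, ?_, ?_⟩
      · intro x
        rw [List.foldl_cons, h2 x, pvTog_mem d a h x]
        by_cases hax : a = x
        · subst hax
          have hcount : (a :: t).count a = t.count a + 1 := by
            simp [List.count_cons]
          rw [hcount]
          by_cases hp : t.count a % 2 = 1 <;>
            by_cases hd : a ∈ d.keys <;>
            simp [Xor', hp, hd] <;> omega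
        · have hcount : (a :: t).count x = t.count x := by
            simp [List.count_cons, hax]
          rw [hcount]
          have hxa : ¬ x = a := fun hh => hax hh.symm
          by_cases hp : t.count x % 2 = 1 <;>
            by_cases hd : x ∈ d.keys <;>
            simp [Xor', hp, hd, hxa]
      · rw [List.foldl_cons, h3]
        have hs := pvTog_size d a h
        simp only [List.length_cons]
        omega

-- B's odd-counting loop is countP of the odd-parity predicate
theorem pv_foldl_count (L : List Int) :
    ∀ acc : Int,
      L.foldl (fun acc v => if PySem.Int.mod v 2 == 1 then acc + 1 else acc) acc
        = acc + (L.countP (fun v => PySem.Int.mod v 2 == 1) : Int) := by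
  induction L with
  | nil => intro acc; simp
  | cons v t ih =>
      intro acc
      rw [List.foldl_cons, ih, List.countP_cons]
      rcases eq_or_ne (PySem.Int.mod v 2) 1 with hv | hv <;> simp [hv] <;> omega

theorem pv_fmod_two (m : ℕ) : PySem.Int.mod (↑m) 2 = ↑(m % 2) := by
  show Int.fmod _ _ = _
  rw [Int.fmod_eq_emod]
  simp

-- the key count: A's final toggle-dict size = number of odd-frequency characters
theorem pv_size_eq_countP (l : List Char) :
    (l.foldl pvTog (PySem.Dict.empty : PySem.Dict Char Int)).size
      = (PySem.Set.ofList l).countP (fun k => PySem.Int.mod (↑(l.count k)) 2 == 1) := by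
  obtain ⟨h1, h2, _⟩ :=
    pvTog_fold_inv l (PySem.Dict.empty : PySem.Dict Char Int) (by simp [PySem.Dict.keys, PySem.Dict.empty])
  have hsz : (l.foldl pvTog (PySem.Dict.empty : PySem.Dict Char Int)).size
      = (l.foldl pvTog (PySem.Dict.empty : PySem.Dict Char Int)).keys.length := by
    show _root_.List.length _ = ((_root_.List.map _ _).length)
    simp
  rw [hsz, List.countP_eq_length_filter]
  have hempty : ∀ c : Char, c ∉ (PySem.Dict.empty : PySem.Dict Char Int).keys := by
    intro c
    simp [PySem.Dict.keys, PySem.Dict.empty]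
  have hperm : (l.foldl pvTog (PySem.Dict.empty : PySem.Dict Char Int)).keys.Perm
      ((PySem.Set.ofList l).filter (fun k => PySem.Int.mod (↑(l.count k)) 2 == 1)) := by
    rw [List.perm_ext_iff_of_nodup h1 ((PySem.Set.nodup_ofList l).filter _)]
    intro c
    rw [h2 c, List.mem_filter, PySem.Set.mem_ofList, pv_fmod_two]
    constructor
    · intro hx
      have hodd : l.count c % 2 = 1 := by
        rcases hx with ⟨ha, _⟩ | ⟨hb, _⟩
        · exact absurd ha (hempty c)
        · exact hb
      have hpos : 0 < l.count c := by omega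
      exact ⟨List.count_pos_iff.mp hpos, by simp [hodd]⟩
    · rintro ⟨_, hb⟩
      have hodd : l.count c % 2 = 1 := by
        simp at hb
        omega
      exact Or.inr ⟨hodd, hempty c⟩
  exact hperm.length_eq

-- ===== VERDICT (by name: the statement is the Claim_ definition above) =====
theorem is_anagram_of_palindrome_spec : Claim_equal_is_anagram_of_palindrome := by
  intro word _
  unfold Spec_is_anagram_of_palindrome is_anagram_of_palindrome is_anagram_of_palindrome_alt
  by_cases hw : word.toList.isEmpty
  · simp [hw]
  · simp only [hw, Bool.false_eq_true, if_false]
    set l := word.toList with hl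
    -- B's value
    rw [PySem.Dict.foldl_insert_getD_add_one_eq_counter]
    have hvals : (PySem.Dict.counter l).values
        = (PySem.Set.ofList l).map (fun k => (↑(l.count k) : Int)) := by
      show ((PySem.Dict.counter l).items).map (·.2) = _
      rw [PySem.Dict.items_counter]
      simp
    rw [hvals, pv_foldl_count, List.countP_map]
    -- A's value
    have hsz := pv_size_eq_countP l
    obtain ⟨_, _, h3⟩ :=
      pvTog_fold_inv l (PySem.Dict.empty : PySem.Dict Char Int) (by simp [PySem.Dict.keys, PySem.Dict.empty])
    have hempty_sz : (PySem.Dict.empty : PySem.Dict Char Int).size = 0 := rfl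
    rw [hempty_sz] at h3
    set n := (l.foldl pvTog (PySem.Dict.empty : PySem.Dict Char Int)).size with hn
    have hcnt : (PySem.Set.ofList l).countP
        ((fun v => PySem.Int.mod v 2 == 1) ∘ fun k => (↑(l.count k) : Int)) = n := by
      rw [hsz]; rfl
    rw [hcnt]
    have hlen : PySem.Str.len word = (↑l.length : Int) := rfl
    rw [hlen, pv_fmod_two]
    by_cases hpar : l.length % 2 = 1
    · rw [hpar]
      simp only [Nat.cast_one]
      have hyes : ((1 : Int) == 1) = true := by decide
      rw [hyes]
      simp only [if_true]
      by_cases hgt : n > 1 <;> simp [hgt] <;> omega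
    · have hpar0 : l.length % 2 = 0 := by omega
      rw [hpar0]
      simp only [Nat.cast_zero]
      have hne : ((0 : Int) == 1) = false := by decide
      rw [hne]
      simp only [Bool.false_eq_true, if_false]
      have hnpar : n % 2 = 0 := by omega
      by_cases h0 : n = 0 <;> simp [h0] <;> omega
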